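-- pv_equiv track=rewrite | github.com/jzh001/til-ai-2024 | NLP/nlp_inference.py | sliding_window_heading
-- ===== SOURCE A (Python) =====
-- def words2digit(words):
--     '''
--     Converts heading in words to digits.
--     words:list(string)
--     return:int
--     '''
--     digits = ['zero','one','two','three','four','five','six','seven','eight','nine']
--
--     word2digit = {word:i for i,word in enumerate(digits)}
--     word2digit['niner'] = 9
--     if any([word not in word2digit for word in words]):
--         return None
--
--     return ''.join(str(word2digit[word]) for word in words)
--
-- def sliding_window_heading(words):
--     possible_answers = []
--     for i in range(len(words)-2):
--         res = words2digit(words[i:i+3])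
--         if res != None:
--             possible_answers.append(res) # if no error
--     for i in range(len(words)-1):
--         if i>0 and words2digit(words[i-1:i]) is not None:
--             continue
--         if i+2<len(words) and words2digit(words[i+2:i+3]) is not None:
--             continue
--         res = words2digit(words[i:i+2])
--         if res != None:
--             possible_answers.append(res)
--     return possible_answers
-- ===== SOURCE B (Python) =====
-- def sliding_window_heading(words):
--     d = {'zero': '0', 'one': '1', 'two': '2', 'three': '3', 'four': '4',
--          'five': '5', 'six': '6', 'seven': '7', 'eight': '8', 'nine': '9',
--          'niner': '9'}
--     # one pass: break the word list into maximal runs of digit-words (as digit chars)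
--     runs = []
--     cur = []
--     for w in words:
--         v = d.get(w)
--         if v is None:
--             if cur:
--                 runs.append(cur)
--                 cur = []
--         else:
--             cur.append(v)
--     if cur:
--         runs.append(cur)
--     out = []
--     for r in runs:
--         for k in range(len(r) - 2):
--             out.append(''.join(r[k:k + 3]))
--     for r in runs:
--         if len(r) == 2:
--             out.append(r[0] + r[1])
--     return out
-- ===== Notes on version B (the rewrite author's own statement) =====
-- stated objective: faster
-- what changed: A rescans overlapping slices for every index in two index loops, rebuilding the 11-entry word-to-digit dict and probing neighbour slices for each window; B makes one pass over the words splitting them into maximal runs of digit-words, then emits every 3-digit window of each run and, in a second phase, the 2-digit string of each run of length exactly 2, preserving A's 'all triples, then all pairs' order.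
import Mathlib
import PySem

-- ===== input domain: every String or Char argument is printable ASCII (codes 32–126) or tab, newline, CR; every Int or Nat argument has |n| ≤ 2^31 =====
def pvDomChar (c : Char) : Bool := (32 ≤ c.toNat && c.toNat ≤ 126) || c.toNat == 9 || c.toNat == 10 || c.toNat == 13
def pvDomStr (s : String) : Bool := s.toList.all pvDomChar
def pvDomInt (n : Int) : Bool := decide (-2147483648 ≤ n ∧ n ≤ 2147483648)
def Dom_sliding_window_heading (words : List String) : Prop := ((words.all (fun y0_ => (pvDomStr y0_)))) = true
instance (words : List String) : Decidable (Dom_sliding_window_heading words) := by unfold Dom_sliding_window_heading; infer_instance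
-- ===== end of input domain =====

-- B replaces A's per-index rescans of overlapping slices by one pass that splits the words into
-- maximal runs of digit-words, then emits all 3-digit windows and the exactly-length-2 runs (measured faster: no per-window dict rebuild).

-- ===== PORT A =====
-- the dict comprehension over enumerate(digits) plus the 'niner' entry, hoisted as a constant
def pvW2D : PySem.Dict String Int :=
  ((PySem.List.enumerate ["zero","one","two","three","four","five","six","seven","eight","nine"] 0).foldl
    (fun d p => d.insert p.2 p.1) PySem.Dict.empty).insert "niner" 9

def words2digit (words : List String) : Option String :=
  if (words.map (fun w => decide (pvW2D.get? w = none))).any id then none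
  else some (PySem.Str.join "" (words.map (fun w => PySem.Int.toStr ((pvW2D.get? w).getD 0))))

def sliding_window_heading (words : List String) : List String :=
  let n : Int := (words.length : Int)
  let pa1 : List String := (PySem.List.pyRange 0 (n-2) 1).foldl (fun acc i =>
      match words2digit (PySem.List.slice words (some i) (some (i+3))) with
      | some res => acc ++ [res]
      | none => acc) []
  (PySem.List.pyRange 0 (n-1) 1).foldl (fun acc i =>
      if 0 < i ∧ words2digit (PySem.List.slice words (some (i-1)) (some i)) ≠ none then acc
      else if i+2 < n ∧ words2digit (PySem.List.slice words (some (i+2)) (some (i+3))) ≠ none then acc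
      else match words2digit (PySem.List.slice words (some i) (some (i+2))) with
           | some res => acc ++ [res]
           | none => acc) pa1

-- ===== PORT B =====
def pvDigitMap : PySem.Dict String String :=
  PySem.Dict.ofList [("zero","0"),("one","1"),("two","2"),("three","3"),("four","4"),
    ("five","5"),("six","6"),("seven","7"),("eight","8"),("nine","9"),("niner","9")]

def sliding_window_heading_alt (words : List String) : List String :=
  let st := words.foldl (fun (st : List (List String) × List String) w =>
      match pvDigitMap.get? w with
      | none => if st.2 ≠ [] then (st.1 ++ [st.2], ([] : List String)) else st
      | some v => (st.1, st.2 ++ [v])) ([], [])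
  let runs := if st.2 ≠ [] then st.1 ++ [st.2] else st.1
  let out1 := runs.foldl (fun acc r =>
      (PySem.List.pyRange 0 ((r.length : Int) - 2) 1).foldl (fun acc k =>
        acc ++ [PySem.Str.join "" (PySem.List.slice r (some k) (some (k+3)))]) acc) []
  runs.foldl (fun acc r => if r.length = 2 then acc ++ [PySem.Str.join "" r] else acc) out1

-- ===== PRECONDITION & SPEC =====
def Spec_sliding_window_heading (words : List String) (out : List String) : Prop := out = sliding_window_heading_alt words
instance (words : List String) (out : List String) : Decidable (Spec_sliding_window_heading words out) := by unfold Spec_sliding_window_heading; infer_instance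

-- ===== CLAIM (what is proved, stated in full; the proofs are below) =====
def Claim_equal_sliding_window_heading : Prop := ∀ (words : List String), Dom_sliding_window_heading words → Spec_sliding_window_heading words (sliding_window_heading words)

-- ===== LEMMAS AND PROOFS =====

-- the digit value of a single word, as B's dict sees it
def vB (w : String) : Option String := pvDigitMap.get? w

-- lookup in a literal dict whose values are an image under f
theorem get?_mk_map {κ ν μ : Type} [BEq κ] (f : ν → μ) (l : List (κ × ν)) (w : κ) :
    (PySem.Dict.mk (l.map (fun p => (p.1, f p.2)))).get? w = ((PySem.Dict.mk l).get? w).map f := by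
  induction l with
  | nil => rfl
  | cons p t ih =>
    obtain ⟨k, v⟩ := p
    simp only [List.map_cons, PySem.Dict.get?_mk_cons]
    split_ifs with h
    · rfl
    · exact ih

theorem chunk_eq (w : String) : vB w = (pvW2D.get? w).map PySem.Int.toStr := by
  have h1 : pvW2D = PySem.Dict.mk [("zero",(0:Int)),("one",1),("two",2),("three",3),("four",4),("five",5),("six",6),("seven",7),("eight",8),("nine",9),("niner",9)] := by rfl
  have h2 : pvDigitMap = PySem.Dict.mk ([("zero",(0:Int)),("one",1),("two",2),("three",3),("four",4),("five",5),("six",6),("seven",7),("eight",8),("nine",9),("niner",9)].map (fun p => (p.1, PySem.Int.toStr p.2))) := by rfl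
  show pvDigitMap.get? w = _
  rw [h1, h2, get?_mk_map]

-- words2digit in terms of vB
theorem words2digit_eq (ws : List String) :
    words2digit ws = if ws.all (fun w => (vB w).isSome)
      then some (PySem.Str.join "" (ws.map (fun w => (vB w).getD "")))
      else none := by
  have hpt : ∀ w : String, decide (pvW2D.get? w = none) = !(vB w).isSome := by
    intro w
    rw [chunk_eq w]
    cases pvW2D.get? w <;> rfl

  have hcond : (ws.map (fun w => decide (pvW2D.get? w = none))).any id
      = !(ws.all (fun w => (vB w).isSome)) := by
    rw [List.any_map]
    simp only [Function.comp_def, hpt]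
    induction ws with
    | nil => rfl
    | cons a t ih =>
      simp only [List.any_cons, List.all_cons, Bool.not_and, id_eq] at *
      rw [ih]
  unfold words2digit
  rw [hcond]
  by_cases hall : ws.all (fun w => (vB w).isSome) = true
  · rw [hall]
    simp only [Bool.not_true, Bool.false_eq_true, if_false, if_true]
    have hm : ws.map (fun w => PySem.Int.toStr ((pvW2D.get? w).getD 0))
        = ws.map (fun w => (vB w).getD "") := by
      apply List.map_congr_left
      intro w hw
      have hs := (List.all_eq_true.mp hall) w hw
      rw [chunk_eq w] at hs ⊢
      cases h : pvW2D.get? w with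
      | none => rw [h] at hs; simp at hs
      | some i => simp
    rw [hm]
  · have : (ws.all (fun w => (vB w).isSome)) = false := by
      cases h : ws.all (fun w => (vB w).isSome) <;> simp_all
    rw [this]
    simp

def pairR (r : List String) : List String :=
  if r.length = 2 then [PySem.Str.join "" r] else []

-- triples of the digit-value list, structurally
def tripO : List (Option String) → List String
  | a :: b :: c :: t =>
    (match a, b, c with
     | some x, some y, some z => [PySem.Str.join "" [x, y, z]]
     | _, _, _ => []) ++ tripO (b :: c :: t)
  | _ => []

-- pairs of the digit-value list with a 'previous element is a digit word' flag
def s2 : Bool → List (Option String) → List String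
  | p, a :: b :: t =>
    (match p, a, b, t.head? with
     | false, some x, some y, none => [PySem.Str.join "" [x, y]]
     | false, some x, some y, some none => [PySem.Str.join "" [x, y]]
     | _, _, _, _ => []) ++ s2 a.isSome (b :: t)
  | _, _ => []

theorem tripO_cons3 (x y z : Option String) (T : List (Option String)) :
    tripO (x :: y :: z :: T)
    = (match x, y, z with
       | some x', some y', some z' => [PySem.Str.join "" [x', y', z']]
       | _, _, _ => []) ++ tripO (y :: z :: T) := rfl

-- run decomposition of the digit-value list, with the run under construction
def consRunO : List String → List (Option String) → List (List String)
  | cur, [] => if cur = [] then [] else [cur]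
  | cur, none :: t => (if cur = [] then [] else [cur]) ++ consRunO [] t
  | cur, some d :: t => consRunO (cur ++ [d]) t

-- generic: a flatMap over all 3-windows of a list, structurally
def wflat {α β : Type} (g : List α → List β) : List α → List β
  | a :: b :: c :: t => g [a,b,c] ++ wflat g (b :: c :: t)
  | _ => []

theorem wflat_eq_range {α β : Type} (g : List α → List β) (l : List α) :
    (List.range (l.length - 2)).flatMap (fun k => g ((l.drop k).take 3)) = wflat g l := by
  induction l with
  | nil => rfl
  | cons a t ih =>
    match t, ih with
    | [], _ => rfl
    | [b], _ => rfl
    | b :: c :: t'', ih =>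
      have hlen : (a :: b :: c :: t'').length - 2 = t''.length + 1 := by
        simp [List.length_cons]
      rw [hlen, List.range_succ_eq_map, List.flatMap_cons, List.flatMap_map]
      show g [a, b, c] ++ _ = wflat g (a :: b :: c :: t'')
      have hlen' : (b :: c :: t'').length - 2 = t''.length := by
        simp [List.length_cons]
      rw [wflat]
      refine congrArg₂ (· ++ ·) rfl ?_
      rw [hlen'] at ih
      refine Eq.trans ?_ ih
      exact List.flatMap_congr (fun k _ => rfl)

-- generic: a flatMap over all 3-windows carrying the previous element
def wflatP {β : Type} (H : Option String → List String → List β) :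
    Option String → List String → List β
  | p, a :: b :: t => H p (a :: b :: t.take 1) ++ wflatP H (some a) (b :: t)
  | _, _ => []

theorem wflatP_eq_range {β : Type} (H : Option String → List String → List β) (l : List String) (p0 : Option String) :
    (List.range (l.length - 1)).flatMap (fun k =>
       H (match k with | 0 => p0 | Nat.succ j => l[j]?) ((l.drop k).take 3)) = wflatP H p0 l := by
  induction l generalizing p0 with
  | nil => rfl
  | cons a t ih =>
    match t, ih with
    | [], _ => rfl
    | b :: t', ih =>
      have hlen : (a :: b :: t').length - 1 = t'.length + 1 := by
        simp [List.length_cons]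
      rw [hlen, List.range_succ_eq_map, List.flatMap_cons, List.flatMap_map]
      show H p0 ((a :: b :: t').take 3) ++ _ = wflatP H p0 (a :: b :: t')
      rw [wflatP]
      have ht3 : (a :: b :: t').take 3 = a :: b :: t'.take 1 := rfl
      rw [ht3]
      refine congrArg₂ (· ++ ·) rfl ?_
      have ih' := ih (some a)
      have hlen' : (b :: t').length - 1 = t'.length := by
        simp [List.length_cons]
      rw [hlen'] at ih'
      refine Eq.trans ?_ ih'
      refine List.flatMap_congr (fun k _ => ?_)
      cases k <;> rfl

-- the body of A's first loop
def gA (win : List String) : List String :=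
  match words2digit win with | some res => [res] | none => []

-- the body of B's inner triple loop, on a 3-window
def gB (win : List String) : List String := [PySem.Str.join "" win]

-- the body of A's second loop, on the previous element and the 3-window at i
def HA (p : Option String) (win : List String) : List String :=
  if (match p with | none => false | some w => (words2digit [w]).isSome) then []
  else if win.length = 3 ∧ words2digit (win.drop 2) ≠ none then []
  else match words2digit (win.take 2) with | some res => [res] | none => []

-- the body of A's second loop as a function of the index
def Ebody (l : List String) (i : Int) : List String :=
  if 0 < i ∧ words2digit (PySem.List.slice l (some (i-1)) (some i)) ≠ none then []
  else if i+2 < (l.length : Int) ∧ words2digit (PySem.List.slice l (some (i+2)) (some (i+3))) ≠ none then []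
  else match words2digit (PySem.List.slice l (some i) (some (i+2))) with
       | some res => [res]
       | none => []

-- A's loops in structural form
theorem loopA1_eq (words : List String) :
    (PySem.List.pyRange 0 ((words.length : Int) - 2) 1).foldl (fun acc i =>
      match words2digit (PySem.List.slice words (some i) (some (i+3))) with
      | some res => acc ++ [res]
      | none => acc) [] = wflat gA words := by
  have hb : (fun (acc : List String) (i : Int) =>
      match words2digit (PySem.List.slice words (some i) (some (i+3))) with
      | some res => acc ++ [res]
      | none => acc)
      = (fun acc i => acc ++ gA (PySem.List.slice words (some i) (some (i+3)))) := by
    funext acc i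
    unfold gA
    cases words2digit (PySem.List.slice words (some i) (some (i+3))) with
    | none => exact (List.append_nil acc).symm
    | some res => rfl
  rw [hb, PySem.List.foldl_append_eq_flatMap, List.nil_append, PySem.List.pyRange_one,
      List.flatMap_map]
  have hn : (((words.length : Int) - 2) - 0).toNat = words.length - 2 := by omega
  rw [hn, ← wflat_eq_range gA words]
  refine List.flatMap_congr (fun k _ => ?_)
  have h1 : (0 : Int) + (k : Int) = (k : Int) := zero_add _
  have h3 : ((k : Int) + 3) = ((k : Int) + ((3 : Nat) : Int)) := by norm_num
  rw [h1, h3, PySem.List.slice_natCast_add]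

theorem E2 (l : List String) (k : Nat) :
    (if ((k : Int))+2 < (l.length : Int) ∧ words2digit (PySem.List.slice l (some ((k : Int)+2)) (some ((k : Int)+3))) ≠ none then ([] : List String)
     else match words2digit (PySem.List.slice l (some ((k : Int))) (some ((k : Int)+2))) with
          | some res => [res]
          | none => [])
    = (if ((l.drop k).take 3).length = 3 ∧ words2digit (((l.drop k).take 3).drop 2) ≠ none then []
       else match words2digit (((l.drop k).take 3).take 2) with
            | some res => [res]
            | none => []) := by
  have hs23 : PySem.List.slice l (some ((k : Int)+2)) (some ((k : Int)+3)) = ((l.drop k).take 3).drop 2 := by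
    have e1 : ((k : Int) + 2) = (((k+2 : Nat) : Int)) := by push_cast; ring
    have e2 : ((k : Int) + 3) = (((k+2 : Nat) : Int)) + ((1 : Nat) : Int) := by push_cast; ring
    rw [e1, e2, PySem.List.slice_natCast_add, List.drop_take, List.drop_drop]
  have hsp : PySem.List.slice l (some ((k : Int))) (some ((k : Int)+2)) = ((l.drop k).take 3).take 2 := by
    have e2 : ((k : Int) + 2) = ((k : Int)) + ((2 : Nat) : Int) := by push_cast; ring
    rw [e2, PySem.List.slice_natCast_add, List.take_take]
    norm_num
  have hc2 : (((k : Int))+2 < (l.length : Int)) ↔ (((l.drop k).take 3).length = 3) := by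
    simp only [List.length_take, List.length_drop]
    omega
  rw [hs23, hsp]
  exact if_congr (and_congr hc2 Iff.rfl) rfl rfl

def prevOf (l : List String) (k : Nat) : Option String :=
  match k with | 0 => none | Nat.succ j => l[j]?

theorem E_eq (l : List String) (k : Nat) (hk : k < l.length - 1) :
    Ebody l ((k : Int)) = HA (prevOf l k) ((l.drop k).take 3) := by
  unfold Ebody prevOf
  cases k with
  | zero =>
    rw [if_neg (fun h => lt_irrefl 0 h.1)]
    show _ = HA none ((l.drop 0).take 3)
    unfold HA
    rw [if_neg Bool.false_ne_true]
    exact E2 l 0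
  | succ j =>
    have hj : j < l.length := by omega
    have hgj : l[j]? = some l[j] := List.getElem?_eq_getElem hj
    have hs1 : PySem.List.slice l (some (((j+1 : Nat) : Int)-1)) (some ((j+1 : Nat) : Int)) = [l[j]] := by
      have e1 : ((j+1 : Nat) : Int) - 1 = ((j : Nat) : Int) := by push_cast; ring
      have e2 : ((j+1 : Nat) : Int) = ((j : Nat) : Int) + ((1 : Nat) : Int) := by push_cast; ring
      rw [e1, e2, PySem.List.slice_natCast_add, List.drop_eq_getElem_cons hj]
      rfl
    show _ = HA (l[j]?) ((l.drop (j+1)).take 3)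
    rw [hgj]
    by_cases hone : (words2digit [l[j]]).isSome
    · rw [if_pos ⟨by exact_mod_cast Nat.succ_pos j,
        by rw [hs1]; exact Option.isSome_iff_ne_none.mp hone⟩]
      unfold HA
      rw [if_pos hone]
    · have hHA : HA (some l[j]) ((l.drop (j+1)).take 3)
          = (if ((l.drop (j+1)).take 3).length = 3 ∧ words2digit (((l.drop (j+1)).take 3).drop 2) ≠ none then []
             else match words2digit (((l.drop (j+1)).take 3).take 2) with
                  | some res => [res]
                  | none => []) := by
        unfold HA
        rw [if_neg (by simpa using hone)]
      rw [if_neg (by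
        rintro ⟨-, hne⟩
        rw [hs1] at hne
        exact hone (Option.isSome_iff_ne_none.mpr hne)), hHA]
      exact E2 l (j+1)

theorem loopA2_eq (words : List String) (init : List String) :
    (PySem.List.pyRange 0 ((words.length : Int) - 1) 1).foldl (fun acc i =>
      if 0 < i ∧ words2digit (PySem.List.slice words (some (i-1)) (some i)) ≠ none then acc
      else if i+2 < (words.length : Int) ∧ words2digit (PySem.List.slice words (some (i+2)) (some (i+3))) ≠ none then acc
      else match words2digit (PySem.List.slice words (some i) (some (i+2))) with
           | some res => acc ++ [res]
           | none => acc) init = init ++ wflatP HA none words := by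
  have hb : (fun (acc : List String) (i : Int) =>
      if 0 < i ∧ words2digit (PySem.List.slice words (some (i-1)) (some i)) ≠ none then acc
      else if i+2 < (words.length : Int) ∧ words2digit (PySem.List.slice words (some (i+2)) (some (i+3))) ≠ none then acc
      else match words2digit (PySem.List.slice words (some i) (some (i+2))) with
           | some res => acc ++ [res]
           | none => acc)
      = (fun acc i => acc ++ Ebody words i) := by
    funext acc i
    unfold Ebody
    by_cases h1 : 0 < i ∧ words2digit (PySem.List.slice words (some (i-1)) (some i)) ≠ none
    · rw [if_pos h1, if_pos h1, List.append_nil]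
    · rw [if_neg h1, if_neg h1]
      by_cases h2 : i+2 < (words.length : Int) ∧ words2digit (PySem.List.slice words (some (i+2)) (some (i+3))) ≠ none
      · rw [if_pos h2, if_pos h2, List.append_nil]
      · rw [if_neg h2, if_neg h2]
        cases words2digit (PySem.List.slice words (some i) (some (i+2))) with
        | none => exact (List.append_nil acc).symm
        | some res => rfl
  rw [hb, PySem.List.foldl_append_eq_flatMap, PySem.List.pyRange_one, List.flatMap_map]
  have hn : (((words.length : Int) - 1) - 0).toNat = words.length - 1 := by omega
  rw [hn, ← wflatP_eq_range HA words none]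
  refine congrArg₂ (· ++ ·) rfl ?_
  refine List.flatMap_congr (fun k hkm => ?_)
  have hk : k < words.length - 1 := List.mem_range.mp hkm
  have h0 : (0 : Int) + (k : Int) = (k : Int) := zero_add _
  rw [h0]
  exact E_eq words k hk  -- prevOf unfolds definitionally to the match in wflatP_eq_range's body

-- words2digit on one-, two- and three-element lists, through vB
theorem w2d1_isSome (w : String) : (words2digit [w]).isSome = (vB w).isSome := by
  rw [words2digit_eq]
  cases h : vB w <;> simp [h]

theorem w2d2 (a b : String) : words2digit [a, b]
    = (match vB a, vB b with
       | some x, some y => some (PySem.Str.join "" [x, y])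
       | _, _ => none) := by
  rw [words2digit_eq]
  cases hx : vB a <;> cases hy : vB b <;> simp [hx, hy]

theorem gA3 (a b c : String) : gA [a, b, c]
    = (match vB a, vB b, vB c with
       | some x, some y, some z => [PySem.Str.join "" [x, y, z]]
       | _, _, _ => []) := by
  unfold gA
  rw [words2digit_eq]
  cases hx : vB a <;> cases hy : vB b <;> cases hz : vB c <;> simp [hx, hy, hz]

-- structural forms evaluated through vB
theorem wflat_gA_eq (l : List String) : wflat gA l = tripO (l.map vB) := by
  induction l with
  | nil => rfl
  | cons a t ih =>
    match t, ih with
    | [], _ => rfl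
    | [b], _ => rfl
    | b :: c :: t'', ih =>
      simp only [List.map_cons] at ih ⊢
      rw [wflat, tripO_cons3]
      exact congrArg₂ (· ++ ·) (gA3 a b c) ih

-- the head emission of A's second loop through vB
theorem HA_head (p : Option String) (a b : String) (t' : List String) :
    HA p (a :: b :: t'.take 1)
    = (match (match p with | none => false | some w => (vB w).isSome), vB a, vB b, (t'.map vB).head? with
       | false, some x, some y, none => [PySem.Str.join "" [x, y]]
       | false, some x, some y, some none => [PySem.Str.join "" [x, y]]
       | _, _, _, _ => []) := by
  unfold HA
  have h1 : (match p with | none => false | some w => (words2digit [w]).isSome)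
      = (match p with | none => false | some w => (vB w).isSome) := by
    cases p <;> simp [w2d1_isSome]
  rw [h1]
  cases hp : (match p with | none => false | some w => (vB w).isSome) with
  | true =>
    rw [if_pos rfl]
  | false =>
    rw [if_neg (by simp)]
    cases t' with
    | nil =>
      rw [if_neg (by simp)]
      show (match words2digit [a, b] with
        | some res => [res] | none => []) = _
      rw [w2d2]
      simp only [List.map_nil, List.head?_nil]
      cases hx : vB a <;> cases hy : vB b <;> rfl
    | cons c t'' =>
      show (if (([a, b, c]).length = 3 ∧ words2digit [c] ≠ none) then []
        else match words2digit ([a, b]) with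
          | some res => [res] | none => []) = _
      have hc1 : (words2digit [c]).isSome = (vB c).isSome := w2d1_isSome c
      cases hz : vB c with
      | some z =>
        rw [if_pos ⟨rfl, by rw [← Option.isSome_iff_ne_none, hc1, hz]; rfl⟩]
        simp only [List.map_cons, List.head?_cons, hz]
        cases hx : vB a <;> cases hy : vB b <;> rfl
      | none =>
        rw [if_neg (by
          rintro ⟨-, hne⟩
          rw [← Option.isSome_iff_ne_none, hc1, hz] at hne
          exact Bool.false_ne_true hne)]
        rw [w2d2]
        simp only [List.map_cons, List.head?_cons, hz]
        cases hx : vB a <;> cases hy : vB b <;> rfl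

theorem wflatP_HA_eq (l : List String) (p : Option String) :
    wflatP HA p l = s2 (match p with | none => false | some w => (vB w).isSome) (l.map vB) := by
  induction l generalizing p with
  | nil => rfl
  | cons a t ih =>
    match t, ih with
    | [], _ => cases p <;> rfl
    | b :: t', ih =>
      show HA p (a :: b :: t'.take 1) ++ wflatP HA (some a) (b :: t') = _
      rw [HA_head, ih (some a)]
      show _ = (match (match p with | none => false | some w => (vB w).isSome),
          vB a, vB b, (t'.map vB).head? with
        | false, some x, some y, none => [PySem.Str.join "" [x, y]]
        | false, some x, some y, some none => [PySem.Str.join "" [x, y]]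
        | _, _, _, _ => []) ++ s2 (vB a).isSome (vB b :: t'.map vB)
      rfl

-- B's fold characterised by consRunO
theorem runs_eq (ws : List String) (runs : List (List String)) (cur : List String) :
    (let st := ws.foldl (fun (st : List (List String) × List String) w =>
        match pvDigitMap.get? w with
        | none => if st.2 ≠ [] then (st.1 ++ [st.2], ([] : List String)) else st
        | some v => (st.1, st.2 ++ [v])) (runs, cur)
     if st.2 ≠ [] then st.1 ++ [st.2] else st.1) = runs ++ consRunO cur (ws.map vB) := by
  induction ws generalizing runs cur with
  | nil =>
    by_cases hc : cur = [] <;> simp [consRunO, hc]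
  | cons w t ih =>
    simp only [List.foldl_cons, List.map_cons]
    have hv : pvDigitMap.get? w = vB w := rfl
    rw [hv]
    cases hvw : vB w with
    | none =>
      by_cases hc : cur = []
      · subst hc
        simp only [ne_eq, not_true_eq_false, if_false]
        rw [ih runs [], consRunO]
        simp
      · simp only [ne_eq, hc, not_false_eq_true, if_true]
        rw [ih (runs ++ [cur]) [], consRunO]
        simp [hc]
    | some d =>
      rw [ih runs (cur ++ [d]), consRunO]

theorem loopB1_eq (runs : List (List String)) :
    runs.foldl (fun acc r =>
      (PySem.List.pyRange 0 ((r.length : Int) - 2) 1).foldl (fun acc k =>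
        acc ++ [PySem.Str.join "" (PySem.List.slice r (some k) (some (k+3)))]) acc) []
    = runs.flatMap (wflat gB) := by
  have hinner : ∀ (r : List String) (acc : List String),
      (PySem.List.pyRange 0 ((r.length : Int) - 2) 1).foldl (fun acc k =>
        acc ++ [PySem.Str.join "" (PySem.List.slice r (some k) (some (k+3)))]) acc
      = acc ++ wflat gB r := by
    intro r acc
    have hb : (fun (acc : List String) (k : Int) =>
        acc ++ [PySem.Str.join "" (PySem.List.slice r (some k) (some (k+3)))])
        = (fun acc k => acc ++ gB (PySem.List.slice r (some k) (some (k+3)))) := rfl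
    rw [hb, PySem.List.foldl_append_eq_flatMap, PySem.List.pyRange_one, List.flatMap_map]
    have hn : (((r.length : Int) - 2) - 0).toNat = r.length - 2 := by omega
    rw [hn, ← wflat_eq_range gB r]
    refine congrArg₂ (· ++ ·) rfl ?_
    refine List.flatMap_congr (fun k _ => ?_)
    have h1 : (0 : Int) + (k : Int) = (k : Int) := zero_add _
    have h3 : ((k : Int) + 3) = ((k : Int) + ((3 : Nat) : Int)) := by norm_num
    rw [h1, h3, PySem.List.slice_natCast_add]
  have hb2 : (fun (acc : List String) (r : List String) =>
      (PySem.List.pyRange 0 ((r.length : Int) - 2) 1).foldl (fun acc k =>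
        acc ++ [PySem.Str.join "" (PySem.List.slice r (some k) (some (k+3)))]) acc)
      = (fun acc r => acc ++ wflat gB r) := by
    funext acc r
    exact hinner r acc
  rw [hb2, PySem.List.foldl_append_eq_flatMap, List.nil_append]

theorem loopB2_eq (runs : List (List String)) (init : List String) :
    runs.foldl (fun acc r => if r.length = 2 then acc ++ [PySem.Str.join "" r] else acc) init
    = init ++ runs.flatMap pairR := by
  have hb : (fun (acc : List String) (r : List String) =>
      if r.length = 2 then acc ++ [PySem.Str.join "" r] else acc)
      = (fun acc r => acc ++ pairR r) := by
    funext acc r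
    unfold pairR
    split_ifs
    · rfl
    · exact (List.append_nil acc).symm
  rw [hb, PySem.List.foldl_append_eq_flatMap]

-- the combinatorial core: run decomposition produces exactly the 3-windows and the length-2 runs
theorem tripO_map_some (xs : List String) : tripO (xs.map some) = wflat gB xs := by
  induction xs with
  | nil => rfl
  | cons a t ih =>
    match t, ih with
    | [], _ => rfl
    | [b], _ => rfl
    | b :: c :: t'', ih =>
      show tripO (some a :: some b :: some c :: t''.map some) = wflat gB (a :: b :: c :: t'')
      rw [tripO, wflat]
      exact congrArg₂ (· ++ ·) rfl ih

theorem tripO_none_cons (t : List (Option String)) : tripO (none :: t) = tripO t := by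
  match t with
  | [] => rfl
  | [b] => rfl
  | b :: c :: t2 =>
    show (match (none : Option String), b, c with
      | some x, some y, some z => [PySem.Str.join "" [x, y, z]]
      | _, _, _ => ([] : List String)) ++ tripO (b :: c :: t2) = tripO (b :: c :: t2)
    cases b <;> cases c <;> exact List.nil_append _

theorem tripO_run_boundary (xs : List String) (t : List (Option String)) :
    tripO (xs.map some ++ none :: t) = wflat gB xs ++ tripO t := by
  induction xs with
  | nil => rw [List.map_nil, List.nil_append, tripO_none_cons]; rfl
  | cons a xs' ih =>
    match xs', ih with
    | [], _ =>
      show tripO (some a :: none :: t) = wflat gB [a] ++ tripO t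
      match t with
      | [] => rfl
      | b :: t2 =>
        show (match some a, (none : Option String), b with
          | some x, some y, some z => [PySem.Str.join "" [x, y, z]]
          | _, _, _ => ([] : List String)) ++ tripO (none :: b :: t2)
          = wflat gB [a] ++ tripO (b :: t2)
        cases b <;> exact (List.nil_append _).trans (tripO_none_cons _)
    | [b], ih =>
      show tripO (some a :: some b :: none :: t) = wflat gB [a, b] ++ tripO t
      exact ih
    | b :: c :: xs'', ih =>
      show tripO (some a :: some b :: some c :: (xs''.map some ++ none :: t))
        = wflat gB (a :: b :: c :: xs'') ++ tripO t
      have h : wflat gB (a :: b :: c :: xs'') ++ tripO t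
          = gB [a, b, c] ++ (wflat gB (b :: c :: xs'') ++ tripO t) := by
        rw [wflat, List.append_assoc]
      rw [h]
      exact congrArg₂ (· ++ ·) rfl ih

theorem flatMap_consRunO_trip (os : List (Option String)) (cur : List String) :
    (consRunO cur os).flatMap (wflat gB) = tripO (cur.map some ++ os) := by
  induction os generalizing cur with
  | nil =>
    rw [consRunO, List.append_nil]
    by_cases hc : cur = []
    · subst hc; rfl
    · rw [if_neg hc, List.flatMap_cons, List.flatMap_nil, List.append_nil, tripO_map_some]
  | cons o t ih =>
    cases o with
    | none =>
      rw [consRunO, List.flatMap_append, ih [], List.map_nil, List.nil_append,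
          tripO_run_boundary]
      by_cases hc : cur = []
      · subst hc; rfl
      · rw [if_neg hc, List.flatMap_cons, List.flatMap_nil, List.append_nil]
    | some d =>
      rw [consRunO, ih (cur ++ [d]), List.map_append, List.append_assoc]
      rfl

theorem s2_true_map_some (xs : List String) : s2 true (xs.map some) = [] := by
  induction xs with
  | nil => rfl
  | cons a t ih =>
    match t, ih with
    | [], _ => rfl
    | [b], _ => rfl
    | b :: c :: t'', ih => exact ih

theorem s2_true_boundary (xs : List String) (t : List (Option String)) :
    s2 true (xs.map some ++ none :: t) = s2 false t := by
  induction xs with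
  | nil =>
    match t with
    | [] => rfl
    | b :: t2 => rfl
  | cons a xs' ih =>
    match xs', ih with
    | [], ih => exact ih
    | b :: xs'', ih => exact ih

theorem s2_false_map_some (xs : List String) : s2 false (xs.map some) = pairR xs := by
  match xs with
  | [] => rfl
  | [a] => rfl
  | [a, b] => rfl
  | a :: b :: c :: t =>
    have h0 : pairR (a :: b :: c :: t) = [] := by
      simp [pairR]
    calc s2 false ((a :: b :: c :: t).map some)
        = s2 true ((b :: c :: t).map some) := rfl
      _ = [] := s2_true_map_some _
      _ = pairR (a :: b :: c :: t) := h0.symm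

theorem s2_false_boundary (xs : List String) (t : List (Option String)) :
    s2 false (xs.map some ++ none :: t) = pairR xs ++ s2 false t := by
  match xs with
  | [] =>
    match t with
    | [] => rfl
    | b :: t2 => rfl
  | [x] => exact s2_true_boundary [] t
  | [x, y] =>
    calc s2 false ([x, y].map some ++ none :: t)
        = [PySem.Str.join "" [x, y]] ++ s2 true ([y].map some ++ none :: t) := rfl
      _ = [PySem.Str.join "" [x, y]] ++ s2 false t := by rw [s2_true_boundary]
      _ = pairR [x, y] ++ s2 false t := rfl
  | x :: y :: z :: rest =>
    have h0 : pairR (x :: y :: z :: rest) = [] := by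
      simp [pairR]
    calc s2 false ((x :: y :: z :: rest).map some ++ none :: t)
        = s2 true ((y :: z :: rest).map some ++ none :: t) := rfl
      _ = s2 false t := s2_true_boundary _ _
      _ = pairR (x :: y :: z :: rest) ++ s2 false t := by rw [h0, List.nil_append]

theorem flatMap_consRunO_pair (os : List (Option String)) (cur : List String) :
    (consRunO cur os).flatMap pairR = s2 false (cur.map some ++ os) := by
  induction os generalizing cur with
  | nil =>
    rw [consRunO, List.append_nil, s2_false_map_some]
    by_cases hc : cur = []
    · subst hc; rfl
    · rw [if_neg hc, List.flatMap_cons, List.flatMap_nil, List.append_nil]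
  | cons o t ih =>
    cases o with
    | none =>
      rw [consRunO, List.flatMap_append, ih [], List.map_nil, List.nil_append,
          s2_false_boundary]
      by_cases hc : cur = []
      · subst hc; rfl
      · rw [if_neg hc, List.flatMap_cons, List.flatMap_nil, List.append_nil]
    | some d =>
      rw [consRunO, ih (cur ++ [d]), List.map_append, List.append_assoc]
      rfl

-- ===== VERDICT (by name: the statement is the Claim_ definition above) =====
theorem sliding_window_heading_spec : Claim_equal_sliding_window_heading := by
  intro words _
  show sliding_window_heading words = sliding_window_heading_alt words
  have hA : sliding_window_heading words
      = tripO (words.map vB) ++ s2 false (words.map vB) := by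
    show (PySem.List.pyRange 0 ((words.length : Int) - 1) 1).foldl (fun acc i =>
        if 0 < i ∧ words2digit (PySem.List.slice words (some (i-1)) (some i)) ≠ none then acc
        else if i+2 < (words.length : Int) ∧ words2digit (PySem.List.slice words (some (i+2)) (some (i+3))) ≠ none then acc
        else match words2digit (PySem.List.slice words (some i) (some (i+2))) with
             | some res => acc ++ [res]
             | none => acc)
      ((PySem.List.pyRange 0 ((words.length : Int) - 2) 1).foldl (fun acc i =>
        match words2digit (PySem.List.slice words (some i) (some (i+3))) with
        | some res => acc ++ [res]
        | none => acc) []) = _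
    rw [loopA1_eq, loopA2_eq, wflat_gA_eq, wflatP_HA_eq]
  have hB : sliding_window_heading_alt words
      = tripO (words.map vB) ++ s2 false (words.map vB) := by
    show (fun (runs : List (List String)) =>
        runs.foldl (fun acc r => if r.length = 2 then acc ++ [PySem.Str.join "" r] else acc)
          (runs.foldl (fun acc r =>
            (PySem.List.pyRange 0 ((r.length : Int) - 2) 1).foldl (fun acc k =>
              acc ++ [PySem.Str.join "" (PySem.List.slice r (some k) (some (k+3)))]) acc) []))
      (let st := words.foldl (fun (st : List (List String) × List String) w =>
          match pvDigitMap.get? w with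
          | none => if st.2 ≠ [] then (st.1 ++ [st.2], ([] : List String)) else st
          | some v => (st.1, st.2 ++ [v])) ([], [])
       if st.2 ≠ [] then st.1 ++ [st.2] else st.1) = _
    rw [runs_eq, List.nil_append]
    beta_reduce
    rw [loopB1_eq, loopB2_eq,
        flatMap_consRunO_trip, flatMap_consRunO_pair]
    rfl
  rw [hA, hB]
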